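-- pv_equiv track=rewrite | github.com/Rhahi/AdventOfCode2018 | 12.py | extend_pots
-- ===== SOURCE A (Python) =====
-- def extend_pots(pots):
--     """Append '.' in the string to make sure leading and following pots are empty.
--     Return resulting pots and front-adjustments made.
--     """
--     adjust = 0
--
--     while pots[0:4] != "....":
--         pots = '.' + pots
--         adjust += 1
--     while pots[-4:] != '....':
--         pots = pots + '.'
--
--     return pots, adjust
-- ===== SOURCE B (Python) =====
-- def extend_pots(pots):
--     """Append '.' in the string to make sure leading and following pots are empty.
--     Return resulting pots and front-adjustments made.
--     """
--     lead = len(pots) - len(pots.lstrip('.'))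
--     adjust = max(0, 4 - lead)
--     padded = '.' * adjust + pots
--     trail = len(padded) - len(padded.rstrip('.'))
--     return padded + '.' * max(0, 4 - trail), adjust
-- ===== Notes on version B (the rewrite author's own statement) =====
-- stated objective: simpler
-- what changed: Replaces A's two grow-one-character-at-a-time while loops with direct arithmetic: count leading/trailing dots via len-minus-lstrip/rstrip and build the padding in one shot with string multiplication.
import Mathlib
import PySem

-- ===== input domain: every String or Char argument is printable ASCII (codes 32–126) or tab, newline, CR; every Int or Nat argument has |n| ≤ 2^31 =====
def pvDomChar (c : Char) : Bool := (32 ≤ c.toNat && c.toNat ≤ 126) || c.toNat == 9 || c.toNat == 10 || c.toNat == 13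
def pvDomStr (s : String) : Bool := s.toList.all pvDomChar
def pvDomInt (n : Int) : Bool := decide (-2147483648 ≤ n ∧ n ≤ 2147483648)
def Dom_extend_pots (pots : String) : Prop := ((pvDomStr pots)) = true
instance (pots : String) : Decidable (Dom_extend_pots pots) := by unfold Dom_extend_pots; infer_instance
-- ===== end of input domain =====

-- B replaces A's two grow-one-dot-at-a-time while loops by direct count-and-construct
-- arithmetic (len - len(lstrip)/len(rstrip) and string multiplication); objective: simpler.

-- ===== PORT A =====
def pvDots4 : List Char := ['.', '.', '.', '.']

-- `while pots[0:4] != "....": pots = '.' + pots; adjust += 1`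
-- fuel 5 only makes the recursion total: each prepension adds a leading dot, so after at
-- most 4 iterations the first four characters are dots and the loop exits.
def pvFrontLoop : Nat → List Char → Int → List Char × Int
  | 0, s, a => (s, a)
  | f+1, s, a => if s.take 4 ≠ pvDots4 then pvFrontLoop f ('.' :: s) (a + 1) else (s, a)

-- `while pots[-4:] != '....': pots = pots + '.'`; pots[-4:] = drop (len-4) (exact, Python
-- takes the last min(len,4) characters). fuel 5 for totality as above.
def pvBackLoop : Nat → List Char → List Char
  | 0, s => s
  | f+1, s => if s.drop (s.length - 4) ≠ pvDots4 then pvBackLoop f (s ++ ['.']) else s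

def extend_pots (pots : String) : String × Int :=
  let fr := pvFrontLoop 5 pots.toList 0
  (String.mk (pvBackLoop 5 fr.1), fr.2)

-- ===== PORT B =====
def extend_pots_alt (pots : String) : String × Int :=
  let l := pots.toList
  -- lead = len(pots) - len(pots.lstrip('.'))  (lstrip('.') = dropWhile (· == '.'))
  let lead : Int := (l.length : Int) - ((l.dropWhile (· == '.')).length : Int)
  let adjust : Int := max 0 (4 - lead)
  let padded := List.replicate adjust.toNat '.' ++ l
  -- trail = len(padded) - len(padded.rstrip('.'))
  let trail : Int := (padded.length : Int) - ((padded.reverse.dropWhile (· == '.')).length : Int)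
  (String.mk (padded ++ List.replicate (max 0 (4 - trail)).toNat '.'), adjust)

-- ===== PRECONDITION & SPEC =====
def Spec_extend_pots (pots : String) (out : String × Int) : Prop := out = extend_pots_alt pots
instance (pots : String) (out : String × Int) : Decidable (Spec_extend_pots pots out) := by unfold Spec_extend_pots; infer_instance

-- ===== CLAIM (what is proved, stated in full; the proofs are below) =====
def Claim_equal_extend_pots : Prop := ∀ (pots : String), Dom_extend_pots pots → Spec_extend_pots pots (extend_pots pots)

-- ===== LEMMAS AND PROOFS =====

def pvLead (l : List Char) : Nat := (l.takeWhile (· == '.')).length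

theorem pvLead_cons_dot (l : List Char) : pvLead ('.' :: l) = pvLead l + 1 := by
  simp [pvLead, List.takeWhile]

theorem pvLead_cons_ne (c : Char) (l : List Char) (h : c ≠ '.') : pvLead (c :: l) = 0 := by
  have h' : (c == '.') = false := by simp [h]
  simp [pvLead, List.takeWhile, h']

theorem pvTake4_iff (l : List Char) : l.take 4 = pvDots4 ↔ 4 ≤ pvLead l := by
  match l with
  | [] => simp [pvDots4, pvLead]
  | a :: l' =>
    by_cases ha : a = '.'
    · subst ha
      rw [pvLead_cons_dot]
      match l' with
      | [] => simp [pvDots4, pvLead]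
      | b :: l'' =>
        by_cases hb : b = '.'
        · subst hb
          rw [pvLead_cons_dot]
          match l'' with
          | [] => simp [pvDots4, pvLead]
          | c :: l₃ =>
            by_cases hc : c = '.'
            · subst hc
              rw [pvLead_cons_dot]
              match l₃ with
              | [] => simp [pvDots4, pvLead]
              | d :: l₄ =>
                by_cases hd : d = '.'
                · subst hd
                  rw [pvLead_cons_dot]
                  simp [pvDots4]
                · simp [pvDots4, pvLead_cons_ne d l₄ hd, hd]
            · simp [pvDots4, pvLead_cons_ne c l₃ hc, hc]
        · simp [pvDots4, pvLead_cons_ne b l'' hb, hb]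
    · simp [pvDots4, pvLead_cons_ne a l' ha, ha]

theorem pvFrontLoop_run (k : Nat) (f : Nat) (s : List Char) (a : Int)
    (hk : k = 4 - min (pvLead s) 4) (hf : k < f) :
    pvFrontLoop f s a = (List.replicate k '.' ++ s, a + k) := by
  induction k generalizing s a f with
  | zero =>
    obtain ⟨f', rfl⟩ : ∃ f', f = f' + 1 := ⟨f - 1, by omega⟩
    have h4 : List.take 4 s = pvDots4 := (pvTake4_iff s).mpr (by omega)
    simp only [pvFrontLoop]
    rw [if_neg (by simp [h4])]
    simp
  | succ k ih =>
    obtain ⟨f', rfl⟩ : ∃ f', f = f' + 1 := ⟨f - 1, by omega⟩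
    have hlt : pvLead s < 4 := by omega
    simp only [pvFrontLoop]
    rw [if_pos (by rw [Ne, pvTake4_iff]; omega)]
    rw [ih f' ('.' :: s) (a + 1) (by rw [pvLead_cons_dot]; omega) (by omega)]
    rw [Prod.mk.injEq]
    constructor
    · simp [List.replicate_succ', List.append_assoc]
    · push_cast; ring

def pvTrail (l : List Char) : Nat := pvLead l.reverse

theorem pvDrop_iff (l : List Char) : l.drop (l.length - 4) = pvDots4 ↔ 4 ≤ pvTrail l := by
  rcases Nat.lt_or_ge l.length 4 with h | h
  · have h1 : l.length - 4 = 0 := by omega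
    have h2 : pvTrail l ≤ l.length := by
      have h3 := congrArg List.length
        (List.takeWhile_append_dropWhile (p := (· == '.')) (l := l.reverse))
      rw [List.length_append, List.length_reverse] at h3
      rw [pvTrail, pvLead]
      omega
    apply iff_of_false
    · intro hh
      rw [h1, List.drop_zero] at hh
      have := congrArg List.length hh
      simp [pvDots4] at this
      omega
    · omega
  · rw [pvTrail, ← pvTake4_iff]
    have key : (l.drop (l.length - 4)).reverse = l.reverse.take 4 := by
      rw [List.reverse_drop]; congr 1; omega
    constructor
    · intro hh; rw [← key, hh]; decide
    · intro hh
      have key' := congrArg List.reverse key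
      rw [List.reverse_reverse] at key'
      rw [key', hh]; decide

theorem pvTrail_snoc_dot (l : List Char) : pvTrail (l ++ ['.']) = pvTrail l + 1 := by
  simp [pvTrail, pvLead_cons_dot]

theorem pvBackLoop_run (k : Nat) (f : Nat) (s : List Char)
    (hk : k = 4 - min (pvTrail s) 4) (hf : k < f) :
    pvBackLoop f s = s ++ List.replicate k '.' := by
  induction k generalizing s f with
  | zero =>
    obtain ⟨f', rfl⟩ : ∃ f', f = f' + 1 := ⟨f - 1, by omega⟩
    have h4' : List.drop (s.length - 4) s = pvDots4 := (pvDrop_iff s).mpr (by omega)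
    simp only [pvBackLoop]
    rw [if_neg (by simp [h4'])]
    simp
  | succ k ih =>
    obtain ⟨f', rfl⟩ : ∃ f', f = f' + 1 := ⟨f - 1, by omega⟩
    simp only [pvBackLoop]
    rw [if_pos (by rw [Ne, pvDrop_iff]; omega)]
    rw [ih f' (s ++ ['.']) (by rw [pvTrail_snoc_dot]; omega) (by omega)]
    simp [List.replicate_succ, List.append_assoc]

theorem pvLen_dropWhile (l : List Char) :
    (l.length : Int) - ((l.dropWhile (· == '.')).length : Int) = (pvLead l : Int) := by
  have := List.takeWhile_append_dropWhile (p := (· == '.')) (l := l)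
  have hlen := congrArg List.length this
  rw [List.length_append] at hlen
  rw [pvLead]
  omega

-- ===== VERDICT (by name: the statement is the Claim_ definition above) =====
theorem extend_pots_spec : Claim_equal_extend_pots := by
  intro pots _
  show _ = _
  unfold extend_pots extend_pots_alt
  rw [pvFrontLoop_run (4 - min (pvLead pots.toList) 4) 5 pots.toList 0 rfl (by omega)]
  simp only [pvLen_dropWhile]
  have hadj : max 0 ((4 : Int) - (pvLead pots.toList : Int)) = ((4 - min (pvLead pots.toList) 4 : Nat) : Int) := by
    omega
  rw [hadj]
  simp only [Int.toNat_natCast]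
  set L := List.replicate (4 - min (pvLead pots.toList) 4) '.' ++ pots.toList with hL
  rw [pvBackLoop_run (4 - min (pvTrail L) 4) 5 L rfl (by omega)]
  have htr := pvLen_dropWhile L.reverse
  rw [List.length_reverse] at htr
  rw [htr]
  have hm : max 0 ((4:Int) - (pvLead L.reverse : Int)) = ((4 - min (pvTrail L) 4 : Nat) : Int) := by
    rw [pvTrail]; omega
  rw [hm, Int.toNat_natCast]
  norm_num
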